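-- pv_equiv track=rewrite | github.com/hasanfarhan33/LeetcodeProblems | longestIdealSubsequence.py | longestIdealSubstring_neet_two
-- ===== SOURCE A (Python) =====
-- def longestIdealSubstring_neet_two(s: str, k: int) -> int:
--     dp = [0] * 26
--     res = 0
--
--     for c in s:
--         curr = ord(c) - ord("a") # Creates a mapping from 0 - 25
--         longest = 1
--         for prev in range(26):
--             if abs(curr - prev) <= k:
--                 longest = max(longest, 1 + dp[prev])
--         dp[curr] = max(dp[curr], longest)
--     return max(dp)
-- ===== SOURCE B (Python) =====
-- def longestIdealSubstring_neet_two(s: str, k: int) -> int: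
--     # position-indexed LIS-style DP: dp holds (char code, best subsequence length ending here)
--     dp = []
--     for c in s:
--         best = 1
--         for code, d in dp:
--             if abs(ord(c) - code) <= k:
--                 best = max(best, d + 1)
--         dp.append((ord(c), best))
--     return max(d for _, d in dp) if dp else 0
-- ===== Notes on version B (the rewrite author's own statement) =====
-- stated objective: alternative
-- what changed: Replaces the 26-letter table DP (scan of a fixed alphabet array per character) with a position-indexed LIS-style DP that compares each character against all previous positions, so no letter indexing or fixed-size table exists; works for any characters and returns 0 on the empty string.
-- outside the precondition, e.g. on longestIdealSubstring_neet_two('Ga', 0): A returns 2, B returns 1; on longestIdealSubstring_neet_two('{', 0): A raises IndexError, B returns 1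
import Mathlib
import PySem

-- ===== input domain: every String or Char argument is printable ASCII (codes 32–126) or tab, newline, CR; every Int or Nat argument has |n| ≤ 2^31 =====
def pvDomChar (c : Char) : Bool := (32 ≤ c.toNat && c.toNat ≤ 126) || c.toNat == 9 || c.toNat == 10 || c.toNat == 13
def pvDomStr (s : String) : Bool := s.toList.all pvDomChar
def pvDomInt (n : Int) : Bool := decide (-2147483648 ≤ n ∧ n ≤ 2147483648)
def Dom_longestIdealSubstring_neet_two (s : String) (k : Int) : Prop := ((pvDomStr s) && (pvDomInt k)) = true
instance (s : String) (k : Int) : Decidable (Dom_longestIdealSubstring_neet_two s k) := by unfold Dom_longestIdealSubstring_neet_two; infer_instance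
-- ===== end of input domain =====

-- B replaces A's 26-letter table DP with a position-indexed LIS-style DP over previous positions (alternative decomposition, same results on lowercase input).

-- ===== PORT A =====
-- inner loop: for prev in range(26): if abs(curr - prev) <= k: longest = max(longest, 1 + dp[prev])
def pvAInner (k curr : Int) (dp : List Int) : Int :=
  (PySem.List.pyRange 0 26 1).foldl
    (fun longest prev => if |curr - prev| ≤ k then max longest (1 + PySem.List.pyGetD dp prev 0) else longest) 1

-- one iteration of the outer 'for c in s' loop
def pvAStep (k : Int) (dp : List Int) (c : Char) : List Int :=
  let curr : Int := (c.toNat : Int) - 97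
  let longest := pvAInner k curr dp
  dp.set curr.toNat (max (PySem.List.pyGetD dp curr 0) longest)

-- max(dp) over the 26-slot table (Python's max of a list: first element, then fold)
def pvAFinal (dp : List Int) : Int :=
  match dp with
  | [] => 0
  | x :: xs => xs.foldl max x

def longestIdealSubstring_neet_two (s : String) (k : Int) : Int :=
  pvAFinal (s.toList.foldl (pvAStep k) (List.replicate 26 0))

-- ===== PORT B =====
-- inner loop: for (code, d) in dp: if abs(ord(c) - code) <= k: best = max(best, d + 1)
def pvBInner (k c : Int) (acc : List (Int × Int)) : Int :=
  acc.foldl (fun best p => if |c - p.1| ≤ k then max best (p.2 + 1) else best) 1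

-- outer loop: for c in s: ... dp.append((ord(c), best))
def pvBLoop (k : Int) : List Int → List (Int × Int) → List (Int × Int)
  | [], acc => acc
  | c :: rest, acc => pvBLoop k rest (acc ++ [(c, pvBInner k c acc)])

-- max(d for _, d in dp) if dp else 0
def pvBFinal (acc : List (Int × Int)) : Int :=
  match acc with
  | [] => 0
  | p :: ps => ps.foldl (fun m q => max m q.2) p.2

def longestIdealSubstring_neet_two_alt (s : String) (k : Int) : Int :=
  pvBFinal (pvBLoop k (s.toList.map (fun c => (c.toNat : Int))) [])

-- ===== PRECONDITION & SPEC =====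
-- Pre_ restricts to the function's natural domain of lowercase-letter strings: on any other
-- character A either raises IndexError (codes outside 71..122) or silently conflates the
-- character with a lowercase slot via Python negative-index wraparound (codes 71..96), an
-- artefact of A's 26-slot table; B computes the genuine answer there.
def Pre_longestIdealSubstring_neet_two (s : String) (k : Int) : Prop :=
  (s.toList.all (fun c => 97 ≤ c.toNat && c.toNat ≤ 122)) = true
instance (s : String) (k : Int) : Decidable (Pre_longestIdealSubstring_neet_two s k) := by
  unfold Pre_longestIdealSubstring_neet_two; infer_instance

def pvWitness_longestIdealSubstring_neet_two : String × Int := ("acebz", 2)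

def Spec_longestIdealSubstring_neet_two (s : String) (k : Int) (out : Int) : Prop := out = longestIdealSubstring_neet_two_alt s k
instance (s : String) (k : Int) (out : Int) : Decidable (Spec_longestIdealSubstring_neet_two s k out) := by unfold Spec_longestIdealSubstring_neet_two; infer_instance

-- ===== CLAIM (what is proved, stated in full; the proofs are below) =====
def Claim_equal_longestIdealSubstring_neet_two : Prop := ∀ (s : String) (k : Int), Dom_longestIdealSubstring_neet_two s k → Pre_longestIdealSubstring_neet_two s k → Spec_longestIdealSubstring_neet_two s k (longestIdealSubstring_neet_two s k)

-- ===== LEMMAS AND PROOFS =====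

-- max of a list of ints, floored at 0
def pvMaxd (xs : List Int) : Int := xs.foldl max 0

theorem pv_foldl_max_init (xs : List Int) : ∀ (a b : Int), xs.foldl max (max a b) = max a (xs.foldl max b) := by
  induction xs with
  | nil => intro a b; rfl
  | cons x xs ih =>
    intro a b
    simp only [List.foldl_cons, max_assoc]
    exact ih a (max b x)

theorem pvMaxd_cons (x : Int) (xs : List Int) : pvMaxd (x :: xs) = max x (pvMaxd xs) := by
  simp only [pvMaxd, List.foldl_cons]
  rw [max_comm 0 x, pv_foldl_max_init]

theorem pvMaxd_nonneg (xs : List Int) : 0 ≤ pvMaxd xs := by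
  induction xs with
  | nil => simp [pvMaxd]
  | cons x xs ih => rw [pvMaxd_cons]; omega

theorem pv_le_maxd_of_mem {x : Int} {xs : List Int} (h : x ∈ xs) : x ≤ pvMaxd xs := by
  induction xs with
  | nil => cases h
  | cons y ys ih =>
    rw [pvMaxd_cons]
    rcases List.mem_cons.1 h with h | h
    · omega
    · have := ih h; omega

theorem pvMaxd_le {xs : List Int} {m : Int} (h0 : 0 ≤ m) (h : ∀ x ∈ xs, x ≤ m) : pvMaxd xs ≤ m := by
  induction xs with
  | nil => simpa [pvMaxd]
  | cons y ys ih =>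
    rw [pvMaxd_cons]
    have h1 := h y (List.mem_cons_self ..)
    have h2 := ih (fun x hx => h x (List.mem_cons_of_mem _ hx))
    omega

theorem pvMaxd_zero_or_mem (xs : List Int) : pvMaxd xs = 0 ∨ pvMaxd xs ∈ xs := by
  induction xs with
  | nil => left; rfl
  | cons y ys ih =>
    rw [pvMaxd_cons]
    rcases le_total y (pvMaxd ys) with h | h
    · rw [max_eq_right h]
      rcases ih with h' | h'
      · left; exact h'
      · right; exact List.mem_cons_of_mem _ h'
    · rw [max_eq_left h]
      right; exact List.mem_cons_self ..

theorem pvMaxd_append_singleton (xs : List Int) (y : Int) : pvMaxd (xs ++ [y]) = max (pvMaxd xs) (max 0 y) := by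
  induction xs with
  | nil => simp [pvMaxd]
  | cons x xs ih => rw [List.cons_append, pvMaxd_cons, ih, pvMaxd_cons]; omega

-- a conditional-max foldl is a plain max-foldl over the filtered, mapped list
theorem pv_foldl_if_max_aux {α : Type} (P : α → Prop) [DecidablePred P] (f : α → Int) (xs : List α) :
    ∀ (a : Int), 0 ≤ a → xs.foldl (fun d x => if P x then max d (f x) else d) a
      = max a (pvMaxd ((xs.filter (fun x => decide (P x))).map f)) := by
  induction xs with
  | nil => intro a ha; simp [pvMaxd]; omega
  | cons x xs ih =>
    intro a ha
    by_cases h : P x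
    · simp only [List.foldl_cons, List.filter_cons, h, decide_true, if_true, List.map_cons]
      rw [ih _ (by omega), pvMaxd_cons]
      omega
    · simp only [List.foldl_cons, List.filter_cons, h, decide_false, Bool.false_eq_true,
        if_false]
      exact ih a ha

theorem pv_foldl_if_max {α : Type} (P : α → Prop) [DecidablePred P] (f : α → Int) (xs : List α) :
    xs.foldl (fun d x => if P x then max d (f x) else d) 1
      = max 1 (pvMaxd ((xs.filter (fun x => decide (P x))).map f)) :=
  pv_foldl_if_max_aux P f xs 1 (by norm_num)

-- max of the B-values recorded for a letter code
def pvLetterMax (acc : List (Int × Int)) (code : Int) : Int :=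
  pvMaxd ((acc.filter (fun p => decide (p.1 = code))).map Prod.snd)

-- the simulation invariant between A's 26-slot table and B's per-position list
def pvInv (dp : List Int) (acc : List (Int × Int)) : Prop :=
  dp.length = 26 ∧
  (∀ l : Nat, l < 26 → dp.getD l 0 = pvLetterMax acc (97 + (l : Int))) ∧
  (∀ p ∈ acc, 97 ≤ p.1 ∧ p.1 ≤ 122 ∧ 1 ≤ p.2)

theorem pvLetterMax_nonneg (acc : List (Int × Int)) (code : Int) : 0 ≤ pvLetterMax acc code :=
  pvMaxd_nonneg _

theorem pv_inner_eq (k c : Int) (dp : List Int) (acc : List (Int × Int))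
    (h : pvInv dp acc) (_hc1 : 97 ≤ c) (_hc2 : c ≤ 122) :
    pvAInner k (c - 97) dp = pvBInner k c acc := by
  obtain ⟨hlen, hinv, hcodes⟩ := h
  rw [pvAInner, pvBInner, pv_foldl_if_max, pv_foldl_if_max]
  apply le_antisymm
  · apply max_le (le_max_left 1 _)
    apply le_trans (pvMaxd_le (le_trans (by norm_num) (le_max_left 1 _)) ?_) le_rfl
    · intro x hx
      rw [List.mem_map] at hx
      obtain ⟨prev, hprev, rfl⟩ := hx
      rw [List.mem_filter] at hprev
      obtain ⟨hmem, hcond⟩ := hprev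
      rw [PySem.List.mem_pyRange_one] at hmem
      have hcond' : |c - 97 - prev| ≤ k := of_decide_eq_true hcond
      -- 1 + dp[prev] where dp[prev] = pvLetterMax acc (97 + prev)
      have hget : PySem.List.pyGetD dp prev 0 = dp.getD prev.toNat 0 := by
        rw [show prev = ((prev.toNat : Nat) : Int) from by omega, PySem.List.pyGetD_natCast,
          Int.toNat_natCast]
      have hltn : prev.toNat < 26 := by omega
      have hval := hinv prev.toNat hltn
      have h97 : (97 : Int) + (prev.toNat : Int) = 97 + prev := by omega
      rw [hget, hval, h97]
      rcases pvMaxd_zero_or_mem ((acc.filter (fun p => decide (p.1 = 97 + prev))).map Prod.snd) with h0 | hm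
      · rw [pvLetterMax, h0]
        omega
      · rw [List.mem_map] at hm
        obtain ⟨p, hp, hpv⟩ := hm
        rw [List.mem_filter] at hp
        obtain ⟨hpmem, hpcode⟩ := hp
        have hpcode' : p.1 = 97 + prev := of_decide_eq_true hpcode
        have : p.2 + 1 ∈ (acc.filter fun p => decide (|c - p.1| ≤ k)).map (fun p => p.2 + 1) := by
          rw [List.mem_map]
          refine ⟨p, List.mem_filter.2 ⟨hpmem, decide_eq_true ?_⟩, rfl⟩
          rw [hpcode', show c - (97 + prev) = c - 97 - prev from by ring]
          exact hcond'
        have := pv_le_maxd_of_mem this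
        rw [pvLetterMax, ← hpv]
        omega
  · apply max_le (le_max_left 1 _)
    apply le_trans (pvMaxd_le (le_trans (by norm_num) (le_max_left 1 _)) ?_) le_rfl
    · intro x hx
      rw [List.mem_map] at hx
      obtain ⟨p, hp, rfl⟩ := hx
      rw [List.mem_filter] at hp
      obtain ⟨hpmem, hpcond⟩ := hp
      have hpcond' : |c - p.1| ≤ k := of_decide_eq_true hpcond
      obtain ⟨hp1, hp2, hp3⟩ := hcodes p hpmem
      -- p lands in letter slot l := p.1 - 97
      set l : Nat := (p.1 - 97).toNat with hl
      have hl26 : l < 26 := by omega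
      have hlcode : (97 : Int) + (l : Int) = p.1 := by omega
      have hsub : p.2 ≤ pvLetterMax acc p.1 := by
        apply pv_le_maxd_of_mem
        rw [List.mem_map]
        exact ⟨p, List.mem_filter.2 ⟨hpmem, decide_eq_true rfl⟩, rfl⟩
      have hval := hinv l hl26
      have hmemrange : (l : Int) ∈ PySem.List.pyRange 0 26 1 := by
        rw [PySem.List.mem_pyRange_one]; omega
      have hgoal : 1 + PySem.List.pyGetD dp (l : Int) 0
          ∈ ((PySem.List.pyRange 0 26 1).filter fun prev => decide (|c - 97 - prev| ≤ k)).map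
              (fun prev => 1 + PySem.List.pyGetD dp prev 0) := by
        rw [List.mem_map]
        refine ⟨(l : Int), List.mem_filter.2 ⟨hmemrange, decide_eq_true ?_⟩, rfl⟩
        have : c - 97 - (l : Int) = c - p.1 := by omega
        rw [this]; exact hpcond'
      have := pv_le_maxd_of_mem hgoal
      rw [PySem.List.pyGetD_natCast, hval, hlcode] at this
      omega

theorem pv_getD_set (xs : List Int) (i j : Nat) (v : Int) (hj : j < xs.length) :
    (xs.set i v).getD j 0 = if j = i then (if i < xs.length then v else xs.getD j 0) else xs.getD j 0 := by
  rw [List.getD_eq_getElem _ _ (by simpa using hj), List.getD_eq_getElem _ _ hj,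
    List.getElem_set]
  split_ifs <;> first | rfl | (exfalso; omega)

theorem pvLetterMax_append (acc : List (Int × Int)) (c v code : Int) :
    pvLetterMax (acc ++ [(c, v)]) code
      = if c = code then max (pvLetterMax acc code) (max 0 v) else pvLetterMax acc code := by
  rw [pvLetterMax, List.filter_append]
  by_cases h : c = code
  · simp only [List.filter_cons, List.filter_nil, h, decide_true, if_true, List.map_append,
      List.map_cons, List.map_nil, pvMaxd_append_singleton, pvLetterMax]
  · simp [h, pvLetterMax]

theorem pv_step_inv (k : Int) (c : Char) (hc1 : 97 ≤ c.toNat) (hc2 : c.toNat ≤ 122)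
    (dp : List Int) (acc : List (Int × Int)) (h : pvInv dp acc) :
    pvInv (pvAStep k dp c) (acc ++ [((c.toNat : Int), pvBInner k (c.toNat : Int) acc)]) := by
  obtain ⟨hlen, hinv, hcodes⟩ := h
  have hc1' : (97 : Int) ≤ (c.toNat : Int) := by omega
  have hc2' : ((c.toNat : Int)) ≤ 122 := by omega
  have hlong : pvAInner k ((c.toNat : Int) - 97) dp = pvBInner k (c.toNat : Int) acc :=
    pv_inner_eq k (c.toNat : Int) dp acc ⟨hlen, hinv, hcodes⟩ hc1' hc2'
  set best := pvBInner k (c.toNat : Int) acc with hbest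
  have hbest1 : 1 ≤ best := by
    rw [hbest, pvBInner, pv_foldl_if_max]; omega
  set l : Nat := c.toNat - 97 with hl
  have hl26 : l < 26 := by omega
  have hcurrNat : ((c.toNat : Int) - 97).toNat = l := by omega
  have hcurr : ((c.toNat : Int) - 97) = ((l : Nat) : Int) := by omega
  refine ⟨?_, ?_, ?_⟩
  · rw [pvAStep]; simpa using hlen
  · intro m hm
    rw [pvAStep]
    simp only [hlong, hcurrNat]
    rw [pv_getD_set _ _ _ _ (by omega), pvLetterMax_append]
    have hread : PySem.List.pyGetD dp ((c.toNat : Int) - 97) 0 = dp.getD l 0 := by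
      rw [hcurr, PySem.List.pyGetD_natCast]
    by_cases hml : m = l
    · have hcc : ((c.toNat : Int)) = 97 + (m : Int) := by omega
      rw [if_pos hml, if_pos (by omega), if_pos hcc, hread, ← hml, hinv m hm]
      have := pvLetterMax_nonneg acc (97 + (m : Int))
      omega
    · have hcc : ¬ ((c.toNat : Int)) = 97 + (m : Int) := by omega
      rw [if_neg hml, if_neg hcc]
      exact hinv m hm
  · intro p hp
    rcases List.mem_append.1 hp with hp | hp
    · exact hcodes p hp
    · rcases List.mem_singleton.1 hp with rfl
      exact ⟨hc1', hc2', hbest1⟩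

theorem pv_loop_inv (k : Int) : ∀ (cs : List Char) (dp : List Int) (acc : List (Int × Int)),
    (∀ c ∈ cs, 97 ≤ c.toNat ∧ c.toNat ≤ 122) → pvInv dp acc →
    pvInv (cs.foldl (pvAStep k) dp) (pvBLoop k (cs.map (fun c => (c.toNat : Int))) acc) := by
  intro cs
  induction cs with
  | nil => intro dp acc _ h; exact h
  | cons c cs ih =>
    intro dp acc hcs h
    obtain ⟨hc1, hc2⟩ := hcs c (List.mem_cons_self ..)
    simp only [List.foldl_cons, List.map_cons, pvBLoop]
    exact ih _ _ (fun x hx => hcs x (List.mem_cons_of_mem _ hx)) (pv_step_inv k c hc1 hc2 dp acc h)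

theorem pv_maxd_eq (dp : List Int) (acc : List (Int × Int)) (h : pvInv dp acc) :
    pvMaxd dp = pvMaxd (acc.map Prod.snd) := by
  obtain ⟨hlen, hinv, hcodes⟩ := h
  apply le_antisymm
  · apply pvMaxd_le (pvMaxd_nonneg _)
    intro x hx
    obtain ⟨m, hm, rfl⟩ := List.mem_iff_getElem.1 hx
    have : dp[m] = dp.getD m 0 := (List.getD_eq_getElem dp 0 hm).symm
    rw [this, hinv m (by omega)]
    rcases pvMaxd_zero_or_mem ((acc.filter (fun p => decide (p.1 = 97 + (m : Int)))).map Prod.snd) with h0 | hmem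
    · rw [pvLetterMax, h0]; exact pvMaxd_nonneg _
    · rw [List.mem_map] at hmem
      obtain ⟨p, hp, hpv⟩ := hmem
      rw [List.mem_filter] at hp
      rw [pvLetterMax, ← hpv]
      exact pv_le_maxd_of_mem (List.mem_map.2 ⟨p, hp.1, rfl⟩)
  · apply pvMaxd_le (pvMaxd_nonneg _)
    intro x hx
    rw [List.mem_map] at hx
    obtain ⟨p, hp, rfl⟩ := hx
    obtain ⟨hp1, hp2, _⟩ := hcodes p hp
    set l : Nat := (p.1 - 97).toNat with hl
    have hl26 : l < 26 := by omega
    have hsub : p.2 ≤ pvLetterMax acc (97 + (l : Int)) := by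
      apply pv_le_maxd_of_mem
      exact List.mem_map.2 ⟨p, List.mem_filter.2 ⟨hp, decide_eq_true (by omega)⟩, rfl⟩
    have : dp.getD l 0 ∈ dp := by
      rw [List.getD_eq_getElem dp 0 (by omega)]
      exact List.getElem_mem _
    have := pv_le_maxd_of_mem this
    rw [hinv l hl26] at this
    omega

theorem pv_final_eq (dp : List Int) (acc : List (Int × Int)) (h : pvInv dp acc) :
    pvAFinal dp = pvBFinal acc := by
  have hmax := pv_maxd_eq dp acc h
  obtain ⟨hlen, hinv, hcodes⟩ := h
  obtain ⟨x, xs, rfl⟩ : ∃ x xs, dp = x :: xs := by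
    cases dp with
    | nil => simp at hlen
    | cons x xs => exact ⟨x, xs, rfl⟩
  have hx0 : 0 ≤ x := by
    have h0 := hinv 0 (by omega)
    have hx : (x :: xs).getD 0 0 = x := rfl
    rw [hx] at h0
    rw [h0]
    exact pvLetterMax_nonneg _ _
  have hleft : xs.foldl max x = pvMaxd (x :: xs) := by
    rw [pvMaxd_cons]
    calc xs.foldl max x = xs.foldl max (max x 0) := by rw [max_eq_left hx0]
    _ = max x (xs.foldl max 0) := pv_foldl_max_init xs x 0
    _ = max x (pvMaxd xs) := rfl
  cases acc with
  | nil =>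
    rw [pvAFinal, pvBFinal, hleft, hmax]
    rfl
  | cons p ps =>
    obtain ⟨-, -, hp2⟩ := hcodes p (List.mem_cons_self ..)
    have hp0 : (0 : Int) ≤ p.2 := by omega
    rw [pvAFinal, pvBFinal, hleft, hmax]
    calc pvMaxd (List.map Prod.snd (p :: ps))
        = max p.2 (pvMaxd (ps.map Prod.snd)) := by rw [List.map_cons, pvMaxd_cons]
    _ = (ps.map Prod.snd).foldl max (max p.2 0) := (pv_foldl_max_init _ p.2 0).symm
    _ = (ps.map Prod.snd).foldl max p.2 := by rw [max_eq_left hp0]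
    _ = ps.foldl (fun m q => max m q.2) p.2 := by rw [List.foldl_map]

-- ===== VERDICT (by name: the statement is the Claim_ definition above) =====
theorem longestIdealSubstring_neet_two_spec : Claim_equal_longestIdealSubstring_neet_two := by
  intro s k _hdom hpre
  have hpre' : ∀ c ∈ s.toList, 97 ≤ c.toNat ∧ c.toNat ≤ 122 := by
    simpa [Pre_longestIdealSubstring_neet_two, List.all_eq_true] using hpre
  unfold Spec_longestIdealSubstring_neet_two
  unfold longestIdealSubstring_neet_two longestIdealSubstring_neet_two_alt
  have hinit : pvInv (List.replicate 26 0) [] := by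
    refine ⟨by simp, ?_, by simp⟩
    intro l hl
    rw [List.getD_eq_getElem _ _ (by simpa using hl), List.getElem_replicate]
    simp [pvLetterMax, pvMaxd]
  exact pv_final_eq _ _ (pv_loop_inv k s.toList (List.replicate 26 0) [] hpre' hinit)
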